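-- pv_equiv track=rewrite | github.com/RitchieFu/BlocksWorldAStar | main.py | get_block_below
-- ===== SOURCE A (Python) =====
-- from typing import Tuple, List, Optional
--
-- def get_block_below(state: Tuple[Tuple[int, ...], ...], block: int) -> int:
--     """
--     Returns the block that is directly below the given block in the state.
--     If the block is on the table, return -1.
--     """
--     for stack in state:
--         for i, b in enumerate(stack):
--             if b == block:
--                 if i == 0:
--                     return -1
--                 else:
--                     return stack[i - 1]
--     return -1  # If block not found, assume it's on the table
-- ===== SOURCE B (Python) =====
-- def get_block_below(state, block):
--     below = {}
--     for stack in state: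
--         prev = -1
--         for b in stack:
--             below.setdefault(b, prev)
--             prev = b
--     return below.get(block, -1)
-- ===== Notes on version B (the rewrite author's own statement) =====
-- stated objective: alternative
-- what changed: Replaces the searching nested loops with early return by a single sweep that builds a block-to-below index (setdefault keeps first occurrences) followed by one dict lookup.
import Mathlib
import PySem

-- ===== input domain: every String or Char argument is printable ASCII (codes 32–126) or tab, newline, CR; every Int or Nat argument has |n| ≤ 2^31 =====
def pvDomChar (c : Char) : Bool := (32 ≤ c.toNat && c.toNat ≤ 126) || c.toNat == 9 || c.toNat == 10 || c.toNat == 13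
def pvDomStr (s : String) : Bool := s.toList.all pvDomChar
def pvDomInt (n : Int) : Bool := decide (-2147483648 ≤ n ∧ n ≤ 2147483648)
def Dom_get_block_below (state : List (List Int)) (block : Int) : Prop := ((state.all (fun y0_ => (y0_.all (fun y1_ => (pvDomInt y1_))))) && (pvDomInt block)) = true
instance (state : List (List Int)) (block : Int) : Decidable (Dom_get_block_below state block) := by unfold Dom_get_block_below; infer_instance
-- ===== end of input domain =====

-- B replaces A's searching nested loops (early return on first match) by one sweep that
-- builds a block→below index and a single dict lookup; same cost, different decomposition.

-- ===== PORT A =====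
-- inner 'for i, b in enumerate(stack)' loop of A, with its early returns
def pvInnerA (stack : List Int) (block : Int) : List (Int × Int) → Option Int
  | [] => none
  | (i, b) :: rest =>
    if b = block then
      some (if i = 0 then -1 else (PySem.List.pyGet? stack (i - 1)).getD 0)  -- i ≥ 1 here, so pyGet? is always some
    else pvInnerA stack block rest

def get_block_below (state : List (List Int)) (block : Int) : Int :=
  match state with
  | [] => -1  -- If block not found, assume it's on the table
  | stack :: rest =>
    match pvInnerA stack block (PySem.List.enumerate stack) with
    | some r => r
    | none => get_block_below rest block

-- ===== PORT B =====
-- one step of B's inner loop: below.setdefault(b, prev); prev = b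
def pvStepB (p : PySem.Dict Int Int × Int) (b : Int) : PySem.Dict Int Int × Int :=
  (p.1.setdefault b p.2, b)

def get_block_below_alt (state : List (List Int)) (block : Int) : Int :=
  let below := state.foldl (fun d stack => (stack.foldl pvStepB (d, -1)).1) PySem.Dict.empty
  below.getD block (-1)

-- ===== PRECONDITION & SPEC =====
def Spec_get_block_below (state : List (List Int)) (block : Int) (out : Int) : Prop := out = get_block_below_alt state block
instance (state : List (List Int)) (block : Int) (out : Int) : Decidable (Spec_get_block_below state block out) := by unfold Spec_get_block_below; infer_instance

-- ===== CLAIM (what is proved, stated in full; the proofs are below) =====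
def Claim_equal_get_block_below : Prop := ∀ (state : List (List Int)) (block : Int), Dom_get_block_below state block → Spec_get_block_below state block (get_block_below state block)

-- ===== LEMMAS AND PROOFS =====

-- abstract 'first match with tracked predecessor' scan, used to characterise both ports
def pvScan (block : Int) : List Int → Int → Option Int
  | [], _ => none
  | b :: t, p => if b = block then some p else pvScan block t b

def pvScanState (block : Int) : List (List Int) → Option Int
  | [] => none
  | s :: r => (pvScan block s (-1)).or (pvScanState block r)

theorem pvInnerA_eq_scan (block : Int) (suf : List Int) : ∀ (pre : List Int),
    pvInnerA (pre ++ suf) block (PySem.List.enumerate suf pre.length) =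
      pvScan block suf (pre.getLastD (-1)) := by
  induction suf with
  | nil => intro pre; simp [pvInnerA, pvScan, PySem.List.enumerate_nil]
  | cons b t ih =>
    intro pre
    rw [PySem.List.enumerate_cons]
    simp only [pvInnerA, pvScan]
    by_cases hb : b = block
    · subst hb
      rw [if_pos rfl, if_pos rfl]
      rcases pre.eq_nil_or_concat with h | ⟨q, a, h⟩
      · subst h; simp
      · subst h
        simp only [List.concat_eq_append]
        have hlen : (q ++ [a]).length = q.length + 1 := by simp
        have hne : ((q ++ [a]).length : Int) ≠ 0 := by rw [hlen]; push_cast; omega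
        rw [if_neg hne]
        have hcast : ((q ++ [a]).length : Int) - 1 = ((q.length : Nat) : Int) := by
          rw [hlen]; push_cast; ring
        rw [hcast, PySem.List.pyGet?_natCast]
        have hget : ((q ++ [a]) ++ b :: t)[q.length]? = some a := by
          rw [List.getElem?_append_left (by simp)]
          simp
        rw [hget]
        simp
    · rw [if_neg hb, if_neg hb]
      have h1 : (pre.length : Int) + 1 = ((pre ++ [b]).length : Nat) := by simp
      have h2 : pre ++ b :: t = (pre ++ [b]) ++ t := by simp
      rw [h1, h2, ih (pre ++ [b])]
      simp

theorem getBlockBelow_eq_scanState (block : Int) (state : List (List Int)) :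
    get_block_below state block = (pvScanState block state).getD (-1) := by
  induction state with
  | nil => simp [get_block_below, pvScanState]
  | cons s r ih =>
    have h := pvInnerA_eq_scan block s []
    simp only [List.nil_append, List.length_nil, Nat.cast_zero, List.getLastD_nil] at h
    simp only [get_block_below, pvScanState]
    rw [h]
    cases pvScan block s (-1) with
    | none => simp [ih, Option.or]
    | some v => simp [Option.or]

theorem foldB_inner (block : Int) (stack : List Int) : ∀ (d : PySem.Dict Int Int) (p : Int),
    (stack.foldl pvStepB (d, p)).1.get? block = (d.get? block).or (pvScan block stack p) := by
  induction stack with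
  | nil => intro d p; simp [pvScan]
  | cons b t ih =>
    intro d p
    simp only [List.foldl_cons, pvStepB, pvScan]
    rw [ih]
    by_cases hb : b = block
    · subst hb
      rw [PySem.Dict.get?_setdefault_self, if_pos rfl]
      cases h : d.get? b with
      | none => simp [Option.or]
      | some v => simp [Option.or]
    · rw [PySem.Dict.get?_setdefault_of_ne d p (Ne.symm hb), if_neg hb]

theorem foldB_outer (block : Int) (state : List (List Int)) : ∀ (d : PySem.Dict Int Int),
    (state.foldl (fun d stack => (stack.foldl pvStepB (d, -1)).1) d).get? block =
      (d.get? block).or (pvScanState block state) := by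
  induction state with
  | nil => intro d; simp [pvScanState]
  | cons s r ih =>
    intro d
    simp only [List.foldl_cons, pvScanState]
    rw [ih, foldB_inner]
    cases d.get? block <;> simp [Option.or]

theorem getBlockBelowAlt_eq_scanState (block : Int) (state : List (List Int)) :
    get_block_below_alt state block = (pvScanState block state).getD (-1) := by
  unfold get_block_below_alt
  rw [PySem.Dict.getD_eq_get?_getD, foldB_outer]
  simp [Option.or]

-- ===== VERDICT (by name: the statement is the Claim_ definition above) =====
theorem get_block_below_spec : Claim_equal_get_block_below := by
  intro state block _
  unfold Spec_get_block_below
  rw [getBlockBelow_eq_scanState, getBlockBelowAlt_eq_scanState]
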